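-- pv_equiv track=rewrite | github.com/piyxu/4096bits-to-2048-rank-4bit-metadata | decode.py | unrank_nk
-- ===== SOURCE A (Python) =====
-- from math import comb
--
-- def unrank_nk(n: int, k: int, r: int):
--     bits = []
--     rem = k
--     for i in range(n):
--         z = comb(n - i - 1, rem) if rem <= (n - i - 1) else 0
--         if r < z:
--             bits.append(0)
--         else:
--             bits.append(1)
--             r -= z
--             rem -= 1
--     return bits
-- ===== SOURCE B (Python) =====
-- from math import comb
--
-- def unrank_nk(n, k, r):
--     # Combinatorial number system: r = C(c_k,k) + ... + C(c_1,1) with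
--     # c_k > ... > c_1 >= 0; the ones of the pattern sit at positions n-1-c_j.
--     # Each c_j is the largest c in [j-1, hi] with comb(c, j) <= r, found by
--     # binary search (stopping if fewer than j slots remain); finally the bit
--     # list is emitted by marking those positions.
--     ones = set()
--     j = k
--     hi = n - 1
--     while j > 0 and hi >= j - 1:
--         lo = j - 1
--         while lo < hi:
--             mid = (lo + hi + 1) // 2
--             if comb(mid, j) <= r:
--                 lo = mid
--             else:
--                 hi = mid - 1
--         r -= comb(lo, j)
--         ones.add(n - 1 - lo)
--         hi = lo - 1
--         j -= 1
--     return [1 if i in ones else 0 for i in range(n)]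
-- ===== Notes on version B (the rewrite author's own statement) =====
-- stated objective: alternative
-- what changed: B unranks via the combinatorial number system: it locates each of the k one-positions directly, binary-searching the largest c with comb(c,j) <= r, collects those positions in a set, and emits the bit list in one final marking pass, instead of A's per-position greedy bit decision with a comb call at every index.
-- outside the precondition, e.g. on unrank_nk(2, 1, 2): A returns [1, 1], B returns [1, 0]; on unrank_nk(2, 1, -1): A returns [0, 0], B returns [0, 1]; on unrank_nk(1, 2, 0): A returns [1], B returns [0]
import Mathlib
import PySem

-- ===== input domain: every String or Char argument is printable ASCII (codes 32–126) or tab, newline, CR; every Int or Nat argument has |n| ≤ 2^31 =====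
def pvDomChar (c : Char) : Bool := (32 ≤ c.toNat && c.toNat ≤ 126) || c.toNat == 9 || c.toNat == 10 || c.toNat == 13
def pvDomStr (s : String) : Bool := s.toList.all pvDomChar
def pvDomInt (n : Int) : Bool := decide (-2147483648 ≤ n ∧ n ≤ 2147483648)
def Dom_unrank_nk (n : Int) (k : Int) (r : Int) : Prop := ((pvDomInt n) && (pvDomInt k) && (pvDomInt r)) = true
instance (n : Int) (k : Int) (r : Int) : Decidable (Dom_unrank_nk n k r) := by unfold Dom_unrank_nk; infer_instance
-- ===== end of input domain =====

-- B unranks via the combinatorial number system: each one-position is found by binary search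
-- on the monotone binomial, then a final pass marks those positions (objective: alternative).

-- ===== PORT A =====
-- math.comb m rem; Python raises ValueError for a negative argument — such calls only happen
-- outside Pre_, where this total guard returns 0 instead.  For 0 ≤ m < rem Python's comb
-- returns 0, exactly as Nat.choose does.
def pyComb (m rem : Int) : Int :=
  if 0 ≤ m ∧ 0 ≤ rem then ((m.toNat).choose rem.toNat : Int) else 0

-- the body of "for i in range(n)": fuel = number of remaining iterations = n - i
def unrankA_loop : Nat → Int → Int → Int → Int → List Int
  | 0, _, _, _, _ => []
  | fuel + 1, n, i, rem, r =>
    let z := if rem ≤ n - i - 1 then pyComb (n - i - 1) rem else 0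
    if r < z then 0 :: unrankA_loop fuel n (i + 1) rem r
    else 1 :: unrankA_loop fuel n (i + 1) (rem - 1) (r - z)

def unrank_nk (n : Int) (k : Int) (r : Int) : List Int :=
  unrankA_loop n.toNat n 0 k r

-- ===== PORT B =====
-- "while lo < hi": the gap hi - lo strictly decreases, so (hi - lo).toNat iterations suffice
-- as fuel at the call site (a totality device only, not an algorithm change).
def bsearch : Nat → Int → Int → Int → Int → Int
  | 0, lo, _, _, _ => lo
  | fuel + 1, lo, hi, j, r =>
    if lo < hi then
      let mid := PySem.Int.floordiv (lo + hi + 1) 2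
      if pyComb mid j ≤ r then bsearch fuel mid hi j r
      else bsearch fuel lo (mid - 1) j r
    else lo

-- the body of "while j > 0 and hi >= j - 1": fuel = j = number of remaining iterations
def bloop : Nat → Int → Int → Int → Int → PySem.Set Int → PySem.Set Int
  | 0, _, _, _, _, ones => ones
  | fuel + 1, n, j, hi, r, ones =>
    if hi < j - 1 then ones
    else
      let lo := j - 1
      let c := bsearch (hi - lo).toNat lo hi j r
      bloop fuel n (j - 1) (c - 1) (r - pyComb c j) (PySem.Set.add ones (n - 1 - c))

def unrank_nk_alt (n : Int) (k : Int) (r : Int) : List Int :=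
  let ones := bloop k.toNat n k (n - 1) r PySem.Set.empty
  (PySem.List.pyRange 0 n 1).map (fun i => if PySem.Set.contains ones i then 1 else 0)

-- ===== PRECONDITION & SPEC =====
-- Pre_ excludes k < 0 with n ≥ 1 (A raises ValueError from comb) and, for n ≥ 1, ranks
-- outside [0, C(n,k)) with 0 < k < n as well as k > n: there A's returned bit pattern is an
-- artefact of its leftover loop state (e.g. trailing ones), not a valid unranking.
def Pre_unrank_nk (n : Int) (k : Int) (r : Int) : Prop :=
  n ≤ 0 ∨ (0 ≤ k ∧ k ≤ n ∧ 0 ≤ r ∧ r < ((n.toNat).choose k.toNat : Int))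
    ∨ (k = n ∧ 0 ≤ r) ∨ (k = 0 ∧ r < 0)
instance (n : Int) (k : Int) (r : Int) : Decidable (Pre_unrank_nk n k r) := by
  unfold Pre_unrank_nk; infer_instance

def pvWitness_unrank_nk : Int × Int × Int := (5, 2, 7)

def Spec_unrank_nk (n : Int) (k : Int) (r : Int) (out : List Int) : Prop := out = unrank_nk_alt n k r
instance (n : Int) (k : Int) (r : Int) (out : List Int) : Decidable (Spec_unrank_nk n k r out) := by unfold Spec_unrank_nk; infer_instance

-- ===== CLAIM (what is proved, stated in full; the proofs are below) =====
def Claim_equal_unrank_nk : Prop := ∀ (n : Int) (k : Int) (r : Int), Dom_unrank_nk n k r → Pre_unrank_nk n k r → Spec_unrank_nk n k r (unrank_nk n k r)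

-- ===== LEMMAS AND PROOFS =====

lemma pyComb_nonneg (m rem : Int) : 0 ≤ pyComb m rem := by
  unfold pyComb; split <;> positivity

lemma pyComb_eq_zero_of_lt (m rem : Int) (h : m < rem) (hr : 0 ≤ rem) : pyComb m rem = 0 := by
  unfold pyComb
  split
  · next hh =>
    have : m.toNat < rem.toNat := by omega
    simp [Nat.choose_eq_zero_of_lt this]
  · rfl

lemma pyComb_pascal (m rem : Int) (hm : 0 ≤ m) (hr : 1 ≤ rem) :
    pyComb (m + 1) rem = pyComb m rem + pyComb m (rem - 1) := by
  unfold pyComb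
  have h1 : (0 ≤ m + 1 ∧ 0 ≤ rem) := ⟨by omega, by omega⟩
  have h2 : (0 ≤ m ∧ 0 ≤ rem) := ⟨hm, by omega⟩
  have h3 : (0 ≤ m ∧ 0 ≤ rem - 1) := ⟨hm, by omega⟩
  simp only [if_pos h1, if_pos h2, if_pos h3]
  have e1 : (m + 1).toNat = m.toNat + 1 := by omega
  have e2 : rem.toNat = (rem - 1).toNat + 1 := by omega
  rw [e1, e2, Nat.choose_succ_succ]
  push_cast; ring

lemma pyComb_mono (j a b : Int) (ha : 0 ≤ a) (hab : a ≤ b) : pyComb a j ≤ pyComb b j := by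
  by_cases hj : 0 ≤ j
  · unfold pyComb
    rw [if_pos ⟨ha, hj⟩, if_pos ⟨by omega, hj⟩]
    exact_mod_cast Nat.choose_le_choose j.toNat (by omega : a.toNat ≤ b.toNat)
  · unfold pyComb
    rw [if_neg (by omega), if_neg (by omega)]

-- binary search: returns the largest c in [lo, hi] with pyComb c j ≤ r
lemma bsearch_spec (j r : Int) : ∀ (fuel : Nat) (lo hi : Int),
    hi - lo ≤ (fuel : Int) → lo ≤ hi → pyComb lo j ≤ r → r < pyComb (hi + 1) j →
    lo ≤ bsearch fuel lo hi j r ∧ bsearch fuel lo hi j r ≤ hi ∧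
      pyComb (bsearch fuel lo hi j r) j ≤ r ∧ r < pyComb (bsearch fuel lo hi j r + 1) j := by
  intro fuel
  induction fuel with
  | zero =>
    intro lo hi hfuel hle hlo hhi
    have : lo = hi := by omega
    subst this
    exact ⟨le_refl lo, le_refl lo, hlo, hhi⟩
  | succ f ih =>
    intro lo hi hfuel hle hlo hhi
    by_cases hlt : lo < hi
    · have hmid : PySem.Int.floordiv (lo + hi + 1) 2 = (lo + hi + 1) / 2 :=
        PySem.Int.floordiv_eq_ediv_of_pos (by omega)
      have hb1 : lo + 1 ≤ (lo + hi + 1) / 2 := by omega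
      have hb2 : (lo + hi + 1) / 2 ≤ hi := by omega
      simp only [bsearch, if_pos hlt, hmid]
      by_cases hc : pyComb ((lo + hi + 1) / 2) j ≤ r
      · rw [if_pos hc]
        obtain ⟨a1, a2, a3, a4⟩ := ih ((lo + hi + 1) / 2) hi (by omega) (by omega) hc hhi
        exact ⟨by omega, a2, a3, a4⟩
      · rw [if_neg hc]
        have hhi' : r < pyComb ((lo + hi + 1) / 2 - 1 + 1) j := by
          rw [show (lo + hi + 1) / 2 - 1 + 1 = (lo + hi + 1) / 2 from by ring]
          omega
        obtain ⟨a1, a2, a3, a4⟩ := ih lo ((lo + hi + 1) / 2 - 1) (by omega) (by omega) hlo hhi'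
        exact ⟨a1, by omega, a3, a4⟩
    · simp only [bsearch, if_neg hlt]
      have : lo = hi := by omega
      subst this
      exact ⟨le_refl lo, le_refl lo, hlo, hhi⟩

-- A emits (gap) zeros, then a 1 at the position with n - i - 1 = c, then continues
lemma A_blocks : ∀ (gap : Nat) (n i j r c : Int),
    c = n - i - 1 - (gap : Int) → 0 ≤ c → 1 ≤ j →
    pyComb c j ≤ r → r < pyComb (c + 1) j →
    unrankA_loop (n - i).toNat n i j r
      = List.replicate gap 0 ++ 1 :: unrankA_loop c.toNat n (n - c) (j - 1) (r - pyComb c j) := by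
  intro gap
  induction gap with
  | zero =>
    intro n i j r c hc hc0 hj hcr hrc
    have hci : c = n - i - 1 := by omega
    have hz : (if j ≤ n - i - 1 then pyComb (n - i - 1) j else 0) = pyComb c j := by
      by_cases h : j ≤ n - i - 1
      · rw [if_pos h, hci]
      · rw [if_neg h, hci, pyComb_eq_zero_of_lt _ _ (by omega) (by omega)]
    have hfe : (n - i).toNat = c.toNat + 1 := by omega
    rw [hfe]
    simp only [unrankA_loop, hz]
    rw [if_neg (by omega), show i + 1 = n - c from by omega]
    rfl
  | succ g ihg =>
    intro n i j r c hc hc0 hj hcr hrc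
    have hr0 : 0 ≤ r := le_trans (pyComb_nonneg c j) hcr
    have hjc : j ≤ c + 1 := by
      by_contra hcon
      rw [pyComb_eq_zero_of_lt (c + 1) j (by omega) (by omega)] at hrc
      omega
    have hpos : c + 1 ≤ n - i - 1 := by push_cast at hc; omega
    have hz : (if j ≤ n - i - 1 then pyComb (n - i - 1) j else 0) = pyComb (n - i - 1) j := by
      rw [if_pos (by omega)]
    have hlt : r < pyComb (n - i - 1) j :=
      lt_of_lt_of_le hrc (pyComb_mono j (c + 1) (n - i - 1) (by omega) hpos)
    have hfe : (n - i).toNat = (n - (i + 1)).toNat + 1 := by push_cast at hc; omega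
    rw [hfe]
    simp only [unrankA_loop, hz]
    rw [if_pos hlt,
        ihg n (i + 1) j r c (by push_cast; push_cast at hc; omega) hc0 hj hcr hrc]
    rfl

-- A with no ones left emits only zeros (any negative-or-zero residual rank)
lemma A_zeros : ∀ (fuel : Nat) (n i r : Int), (fuel : Int) = n - i → r < 1 →
    unrankA_loop fuel n i 0 r = List.replicate fuel 0 := by
  intro fuel
  induction fuel with
  | zero => intro n i r _ _; rfl
  | succ f ih =>
    intro n i r hf hr
    have hz : (if (0:Int) ≤ n - i - 1 then pyComb (n - i - 1) 0 else 0) = 1 := by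
      rw [if_pos (by omega)]
      unfold pyComb
      rw [if_pos ⟨by omega, le_refl 0⟩]
      simp
    simp only [unrankA_loop, hz]
    rw [if_pos (by omega : r < 1), ih n (i + 1) r (by omega) hr]
    rfl

-- A with as many ones left as positions emits only ones
lemma A_ones : ∀ (fuel : Nat) (n i r : Int), (fuel : Int) = n - i → 0 ≤ r →
    unrankA_loop fuel n i (n - i) r = List.replicate fuel 1 := by
  intro fuel
  induction fuel with
  | zero => intro n i r _ _; rfl
  | succ f ih =>
    intro n i r hf hr
    have hz : (if n - i ≤ n - i - 1 then pyComb (n - i - 1) (n - i) else 0) = 0 := by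
      rw [if_neg (by omega)]
    simp only [unrankA_loop, hz]
    rw [if_neg (by omega), show n - i - 1 = n - (i + 1) from by ring, show r - 0 = r from by ring,
        ih n (i + 1) r (by omega) hr]
    rfl

-- bloop only ever adds elements
lemma bloop_mono : ∀ (fuel : Nat) (n j hi r : Int) (ones : PySem.Set Int) (x : Int),
    x ∈ ones → x ∈ bloop fuel n j hi r ones := by
  intro fuel
  induction fuel with
  | zero => intro n j hi r ones x hx; exact hx
  | succ f ih =>
    intro n j hi r ones x hx
    by_cases h : hi < j - 1
    · simpa [bloop, h] using hx
    · simp only [bloop, if_neg h]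
      exact ih n (j - 1) _ _ _ x ((PySem.Set.mem_add _ _ _).mpr (Or.inl hx))

-- a marking pass over a range none of whose points are marked is all zeros
lemma map_range_zeros : ∀ (cnt : Nat) (s : Int) (f : Int → Int),
    (∀ p, s ≤ p → p < s + (cnt : Int) → f p = 0) →
    (PySem.List.pyRange s (s + (cnt : Int)) 1).map f = List.replicate cnt 0 := by
  intro cnt
  induction cnt with
  | zero =>
    intro s f _
    rw [PySem.List.pyRange_one_eq_nil (by omega)]; rfl
  | succ c ih =>
    intro s f hf
    rw [PySem.List.pyRange_one_cons (by omega : s < s + ((c + 1 : Nat) : Int))]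
    have e : s + ((c + 1 : Nat) : Int) = (s + 1) + (c : Int) := by push_cast; ring
    rw [List.map_cons, hf s (le_refl s) (by omega), e,
        ih (s + 1) f (by intro p h1 h2; exact hf p (by omega) (by omega))]
    rfl

-- endpoint form of map_range_zeros
lemma map_range_zeros' (s t : Int) (f : Int → Int)
    (h : ∀ p, s ≤ p → p < t → f p = 0) :
    (PySem.List.pyRange s t 1).map f = List.replicate (t - s).toNat 0 := by
  by_cases hst : s ≤ t
  · have e : t = s + ((t - s).toNat : Int) := by omega
    rw [e, map_range_zeros (t - s).toNat s f (by intro p h1 h2; exact h p h1 (by omega))]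
    congr 1
    omega
  · rw [PySem.List.pyRange_one_eq_nil (by omega), show (t - s).toNat = 0 from by omega]
    rfl

-- B with as many ones left as positions marks every remaining position
lemma bfull : ∀ (fuel : Nat) (n i r : Int) (acc : PySem.Set Int),
    0 ≤ i → (fuel : Int) = n - i → (∀ x ∈ acc, x < i) →
    (PySem.List.pyRange i n 1).map
        (fun p => if PySem.Set.contains (bloop fuel n (fuel : Int) ((fuel : Int) - 1) r acc) p then 1 else 0)
      = List.replicate fuel (1 : Int) := by
  intro fuel
  induction fuel with
  | zero =>
    intro n i r acc hi0 hf hacc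
    rw [PySem.List.pyRange_one_eq_nil (by omega)]
    rfl
  | succ f ih =>
    intro n i r acc hi0 hf hacc
    have hB : bloop (f+1) n ((f+1:Nat):Int) (((f+1:Nat):Int) - 1) r acc
        = bloop f n ((f:Nat):Int) (((f:Nat):Int) - 1) (r - pyComb (((f+1:Nat):Int) - 1) ((f+1:Nat):Int))
            (PySem.Set.add acc (n - 1 - (((f+1:Nat):Int) - 1))) := by
      simp only [bloop]
      rw [if_neg (by omega),
          show (((f+1:Nat):Int) - 1) - (((f+1:Nat):Int) - 1) = 0 from by ring]
      simp only [Int.toNat_zero, bsearch]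
      rw [show ((f+1:Nat):Int) - 1 - 1 = ((f:Nat):Int) - 1 from by push_cast; ring,
          show ((f+1:Nat):Int) - 1 = ((f:Nat):Int) from by push_cast; ring]
    have hpos : n - 1 - (((f+1:Nat):Int) - 1) = i := by omega
    rw [hB, hpos]
    have hcons : PySem.List.pyRange i n 1 = i :: PySem.List.pyRange (i + 1) n 1 :=
      PySem.List.pyRange_one_cons (by omega)
    rw [hcons, List.map_cons]
    have hmem : PySem.Set.contains
        (bloop f n ((f:Nat):Int) (((f:Nat):Int) - 1)
          (r - pyComb (((f+1:Nat):Int) - 1) ((f+1:Nat):Int)) (PySem.Set.add acc i)) i = true := by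
      rw [PySem.Set.contains_iff]
      exact bloop_mono f n _ _ _ _ _ ((PySem.Set.mem_add _ _ _).mpr (Or.inr rfl))
    rw [if_pos hmem,
        ih n (i + 1) (r - pyComb (((f+1:Nat):Int) - 1) ((f+1:Nat):Int)) (PySem.Set.add acc i)
          (by omega) (by omega)
          (by intro x hx
              rcases (PySem.Set.mem_add _ _ _).mp hx with h | h
              · have := hacc x h; omega
              · omega)]
    rfl

-- the coupled invariant: the marking of bloop's result reproduces A's bit list
lemma coupled : ∀ (fuel : Nat) (n i r : Int) (acc : PySem.Set Int),
    0 ≤ i → (fuel : Int) ≤ n - i → 0 ≤ r → r < pyComb (n - i) (fuel : Int) →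
    (∀ x ∈ acc, x < i) →
    (∀ x ∈ bloop fuel n (fuel : Int) (n - i - 1) r acc, x ∈ acc ∨ (i ≤ x ∧ x < n)) ∧
    (PySem.List.pyRange i n 1).map
        (fun p => if PySem.Set.contains (bloop fuel n (fuel : Int) (n - i - 1) r acc) p then 1 else 0)
      = unrankA_loop (n - i).toNat n i (fuel : Int) r := by
  intro fuel
  induction fuel with
  | zero =>
    intro n i r acc hi0 hfl hr0 hrb hacc
    have hr : r = 0 := by
      have : pyComb (n - i) ((0:Nat):Int) = 1 := by
        unfold pyComb
        rw [if_pos ⟨by omega, by simp⟩]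
        simp
      rw [this] at hrb; omega
    subst hr
    refine ⟨fun x hx => Or.inl hx, ?_⟩
    rw [show ((0:Nat):Int) = (0:Int) from rfl, A_zeros (n - i).toNat n i 0 (by omega) (by omega)]
    exact map_range_zeros' i n _ (by
      intro p h1 h2
      rw [if_neg]
      intro hcon
      have := (PySem.Set.contains_iff _ _).mp hcon
      have := hacc p this
      omega)
  | succ f ih =>
    intro n i r acc hi0 hfl hr0 hrb hacc
    have hj1 : (1:Int) ≤ ((f+1:Nat):Int) := by push_cast; omega
    obtain ⟨h1, h2, h3, h4⟩ := bsearch_spec ((f+1:Nat):Int) r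
      ((n - i - 1) - (((f+1:Nat):Int) - 1)).toNat (((f+1:Nat):Int) - 1) (n - i - 1)
      (by omega) (by omega)
      (by rw [pyComb_eq_zero_of_lt _ _ (by omega) (by omega)]; exact hr0)
      (by rw [show n - i - 1 + 1 = n - i from by ring]; exact hrb)
    set J : Int := ((f+1:Nat):Int) with hJ
    set c : Int := bsearch ((n - i - 1) - (J - 1)).toNat (J - 1) (n - i - 1) J r with hcdef
    have hc0 : 0 ≤ c := by omega
    have hp_lo : i ≤ n - 1 - c := by omega
    have hp_hi : n - 1 - c < n := by omega
    have hrb' : r - pyComb c J < pyComb c (J - 1) := by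
      have hp := pyComb_pascal c J hc0 hj1
      linarith
    have hB : bloop (f+1) n J (n - i - 1) r acc
        = bloop f n ((f:Nat):Int) (c - 1) (r - pyComb c J) (PySem.Set.add acc (n - 1 - c)) := by
      simp only [bloop, ← hcdef]
      rw [if_neg (by omega : ¬ (n - i - 1 < J - 1)), show J - 1 = ((f:Nat):Int) from by omega]
    have hmemadd : ∀ x ∈ PySem.Set.add acc (n - 1 - c), x < n - c := by
      intro x hx
      rcases (PySem.Set.mem_add _ _ _).mp hx with h | h
      · have := hacc x h; omega
      · omega
    obtain ⟨ihmem, ihmap⟩ := ih n (n - c) (r - pyComb c J) (PySem.Set.add acc (n - 1 - c))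
      (by omega) (by omega) (by omega)
      (by rw [show n - (n - c) = c from by ring, show ((f:Nat):Int) = J - 1 from by omega]; exact hrb')
      hmemadd
    rw [show n - (n - c) - 1 = c - 1 from by ring] at ihmem ihmap
    rw [show n - (n - c) = c from by ring] at ihmap
    constructor
    · intro x hx
      rw [hB] at hx
      rcases ihmem x hx with h | ⟨ha, hb⟩
      · rcases (PySem.Set.mem_add _ _ _).mp h with h' | h'
        · exact Or.inl h'
        · exact Or.inr ⟨by omega, by omega⟩
      · exact Or.inr ⟨by omega, hb⟩
    · rw [A_blocks (n - i - 1 - c).toNat n i J r c (by omega) hc0 hj1 h3 h4]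
      simp only [hB]
      rw [PySem.List.pyRange_one_append i (n - c) n (by omega) (by omega), List.map_append,
          show n - c = (n - 1 - c) + 1 from by ring,
          PySem.List.pyRange_one_succ_right hp_lo, List.map_append]
      rw [show (n - 1 - c) + 1 = n - c from by ring] at *
      rw [map_range_zeros' i (n - 1 - c) _ (by
        intro p hp1 hp2
        rw [if_neg]
        intro hcon
        have hmem := (PySem.Set.contains_iff _ _).mp hcon
        rcases ihmem p hmem with h | ⟨ha, hb⟩
        · rcases (PySem.Set.mem_add _ _ _).mp h with h' | h'
          · have := hacc p h'; omega
          · omega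
        · omega)]
      have hpmem : PySem.Set.contains
          (bloop f n ((f:Nat):Int) (c - 1) (r - pyComb c J) (PySem.Set.add acc (n - 1 - c)))
          (n - 1 - c) = true := by
        rw [PySem.Set.contains_iff]
        exact bloop_mono f n _ _ _ _ _ ((PySem.Set.mem_add _ _ _).mpr (Or.inr rfl))
      rw [List.map_singleton, if_pos hpmem, ihmap,
          show n - 1 - c - i = n - i - 1 - c from by ring,
          show J - 1 = ((f:Nat):Int) from by omega]
      simp

-- ===== VERDICT (by name: the statement is the Claim_ definition above) =====
theorem unrank_nk_spec : Claim_equal_unrank_nk := by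
  intro n k r _ hpre
  unfold Spec_unrank_nk unrank_nk unrank_nk_alt
  by_cases hn : n ≤ 0
  · have h1 : n.toNat = 0 := by omega
    rw [h1, PySem.List.pyRange_one_eq_nil (by omega)]
    rfl
  · rcases hpre with h | ⟨hk, hkn, hr0, hrC⟩ | ⟨hkn, hr0⟩ | ⟨hk0, hr⟩
    · omega
    · have hkc : ((k.toNat : Nat) : Int) = k := by omega
      have hC : pyComb n k = ((n.toNat).choose k.toNat : Int) := by
        unfold pyComb; rw [if_pos ⟨by omega, hk⟩]
      have := (coupled k.toNat n 0 r PySem.Set.empty (le_refl 0)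
        (by omega) hr0 (by rw [hkc]; simpa [hC] using hrC) (by intro x hx; cases hx)).2
      rw [hkc] at this
      norm_num at this ⊢
      exact this.symm
    · rw [hkn]
      have hA := A_ones n.toNat n 0 r (by omega) hr0
      rw [show n - 0 = n from by ring] at hA
      have hkc : ((n.toNat : Nat) : Int) = n := by omega
      have hB := bfull n.toNat n 0 r PySem.Set.empty (le_refl 0) (by omega)
        (by intro x hx; cases hx)
      rw [hkc] at hB
      rw [hA]
      exact hB.symm
    · subst hk0
      rw [A_zeros n.toNat n 0 r (by omega) (by omega)]
      have hz : ∀ p, (0:Int) ≤ p → p < n →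
          (fun q => if PySem.Set.contains (bloop (0:Int).toNat n 0 (n - 1) r PySem.Set.empty) q then (1:Int) else 0) p = 0 := by
        intro p _ _
        dsimp only
        rw [if_neg]
        intro hcon
        have hm := (PySem.Set.contains_iff _ _).mp hcon
        simp [bloop, PySem.Set.empty] at hm
      rw [map_range_zeros' 0 n _ hz]
      congr 1
      omega
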